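-- pv_equiv track=rewrite | github.com/mayanktripathi4u/Google-Cloud-Platform | BigQuery/ER-Diagram/erd_graphviz.py | convert_schema_to_dot
-- ===== SOURCE A (Python) =====
-- def convert_schema_to_dot(schema_info):
--     dot_content = "digraph G {\n"
--
--     # Loop through schema to create nodes for each table
--     for table, columns in schema_info.items():
--         node_id = table.replace(" ", "_").replace("-", "_")  # Clean table name
--         dot_content += f'  "{node_id}" [label="{table}\\n' + "\\n".join(columns) + '"];\n'
--
--     # Generate relationships (if needed)
--     for table, columns in schema_info.items():
--         if "id" in columns:  # Example: Link tables by 'id' column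
--             dot_content += f'  "{table}" -> "another_table" [label="id"];\n'
--
--     dot_content += "}\n"
--     return dot_content
-- ===== SOURCE B (Python) =====
-- def convert_schema_to_dot(schema_info):
--     # Divide and conquer: recursively split the item list in half; each call
--     # returns the (node section, edge section) pair for its slice, and the two
--     # halves' pairs are concatenated componentwise.
--     def go(items):
--         if not items:
--             return ("", "")
--         if len(items) == 1:
--             table, columns = items[0]
--             node_id = table.replace(" ", "_").replace("-", "_")
--             node = f'  "{node_id}" [label="{table}\\n' + "\\n".join(columns) + '"];\n'
--             edge = f'  "{table}" -> "another_table" [label="id"];\n' if "id" in columns else ""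
--             return (node, edge)
--         mid = len(items) // 2
--         ln, le = go(items[:mid])
--         rn, re = go(items[mid:])
--         return (ln + rn, le + re)
--
--     nodes, edges = go(list(schema_info.items()))
--     return "digraph G {\n" + nodes + edges + "}\n"
-- ===== Notes on version B (the rewrite author's own statement) =====
-- stated objective: alternative
-- what changed: A makes two separate left-to-right scans appending lines onto one growing string (nodes pass, then edges pass); B is a divide-and-conquer recursion that splits the item list in half, computes each half's (node section, edge section) pair recursively, and concatenates the pairs componentwise, assembling the document once at the top.
import Mathlib
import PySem

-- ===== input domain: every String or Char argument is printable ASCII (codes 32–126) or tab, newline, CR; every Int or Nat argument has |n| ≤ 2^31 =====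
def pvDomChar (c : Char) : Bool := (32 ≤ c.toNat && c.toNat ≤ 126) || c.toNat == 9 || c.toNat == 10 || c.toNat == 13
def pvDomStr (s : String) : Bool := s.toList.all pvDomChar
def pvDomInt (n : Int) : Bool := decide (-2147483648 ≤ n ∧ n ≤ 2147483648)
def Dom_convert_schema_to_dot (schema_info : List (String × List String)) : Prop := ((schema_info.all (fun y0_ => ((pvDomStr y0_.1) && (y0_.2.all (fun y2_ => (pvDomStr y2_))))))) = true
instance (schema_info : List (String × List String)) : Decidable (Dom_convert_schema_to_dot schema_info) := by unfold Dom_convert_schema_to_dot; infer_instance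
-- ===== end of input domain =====

-- B replaces A's two left-to-right string-appending scans by a divide-and-conquer recursion over halves of the item list, returning (node section, edge section) pairs; same output (alternative algorithm).


-- ===== PORT A =====
def convert_schema_to_dot (schema_info : List (String × List String)) : String :=
  let dot0 := "digraph G {\n"
  -- first scan: node lines, appended to the growing string
  let dot1 := schema_info.foldl (fun acc tc =>
    let node_id := PySem.Str.replace (PySem.Str.replace tc.1 " " "_") "-" "_"
    acc ++ ("  \"" ++ node_id ++ "\" [label=\"" ++ tc.1 ++ "\\n" ++ PySem.Str.join "\\n" tc.2 ++ "\"];\n")) dot0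
  -- second scan: edge lines
  let dot2 := schema_info.foldl (fun acc tc =>
    if "id" ∈ tc.2 then
      acc ++ ("  \"" ++ tc.1 ++ "\" -> \"another_table\" [label=\"id\"];\n")
    else acc) dot1
  dot2 ++ "}\n"

-- ===== PORT B =====
-- B's divide-and-conquer helper `go`: (node section, edge section) for a slice;
-- a singleton is a leaf, longer lists are split at len // 2 (PySem.Int.floordiv on
-- nonnegative lengths = Nat division, exact here) and the halves' pairs concatenated.
def pvGo (items : List (String × List String)) : String × String :=
  match items with
  | [] => ("", "")
  | [tc] =>
    let node_id := PySem.Str.replace (PySem.Str.replace tc.1 " " "_") "-" "_"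
    let node := "  \"" ++ node_id ++ "\" [label=\"" ++ tc.1 ++ "\\n" ++ PySem.Str.join "\\n" tc.2 ++ "\"];\n"
    let edge := if "id" ∈ tc.2 then "  \"" ++ tc.1 ++ "\" -> \"another_table\" [label=\"id\"];\n" else ""
    (node, edge)
  | x :: y :: rest =>
    let mid := (x :: y :: rest).length / 2
    let l := pvGo ((x :: y :: rest).take mid)
    let r := pvGo ((x :: y :: rest).drop mid)
    (l.1 ++ r.1, l.2 ++ r.2)
termination_by items.length
decreasing_by
  · simp [List.length_take]; omega
  · simp; omega

def convert_schema_to_dot_alt (schema_info : List (String × List String)) : String :=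
  let p := pvGo schema_info
  "digraph G {\n" ++ p.1 ++ p.2 ++ "}\n"

-- ===== PRECONDITION & SPEC =====
def Spec_convert_schema_to_dot (schema_info : List (String × List String)) (out : String) : Prop := out = convert_schema_to_dot_alt schema_info
instance (schema_info : List (String × List String)) (out : String) : Decidable (Spec_convert_schema_to_dot schema_info out) := by unfold Spec_convert_schema_to_dot; infer_instance

-- ===== CLAIM (what is proved, stated in full; the proofs are below) =====
def Claim_equal_convert_schema_to_dot : Prop := ∀ (schema_info : List (String × List String)), Dom_convert_schema_to_dot schema_info → Spec_convert_schema_to_dot schema_info (convert_schema_to_dot schema_info)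

-- ===== LEMMAS AND PROOFS =====

-- the per-table node line and (possibly empty) edge contribution, used as proof abbreviations
def pvNodeStr (tc : String × List String) : String :=
  "  \"" ++ PySem.Str.replace (PySem.Str.replace tc.1 " " "_") "-" "_" ++ "\" [label=\"" ++ tc.1 ++ "\\n" ++ PySem.Str.join "\\n" tc.2 ++ "\"];\n"

def pvEdgeStr (tc : String × List String) : String :=
  if "id" ∈ tc.2 then "  \"" ++ tc.1 ++ "\" -> \"another_table\" [label=\"id\"];\n" else ""

-- concatenation of a list of strings (flatten), the common denominator of both ports
def pvCat (l : List String) : String := l.foldr (· ++ ·) ""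

theorem pvCat_append (a b : List String) : pvCat (a ++ b) = pvCat a ++ pvCat b := by
  induction a with
  | nil => simp [pvCat]
  | cons x xs ih => simp [pvCat, List.foldr_cons] at *; rw [ih, String.append_assoc]

-- B's divide-and-conquer recursion computes exactly the concatenation of the per-item strings.
theorem pvGo_eq (xs : List (String × List String)) :
    pvGo xs = (pvCat (xs.map pvNodeStr), pvCat (xs.map pvEdgeStr)) := by
  fun_induction pvGo xs with
  | case1 => simp [pvCat]
  | case2 tc =>
    simp only [List.map_cons, List.map_nil, pvCat, List.foldr_cons, List.foldr_nil,
      pvNodeStr, pvEdgeStr, String.append_empty, Prod.mk.injEq]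
    exact ⟨rfl, rfl⟩
  | case3 x y rest mid l r ih1 ih2 =>
    have h1 : pvGo ((x :: y :: rest).take ((x :: y :: rest).length / 2))
        = (pvCat (((x :: y :: rest).take ((x :: y :: rest).length / 2)).map pvNodeStr),
           pvCat (((x :: y :: rest).take ((x :: y :: rest).length / 2)).map pvEdgeStr)) := ih1
    have h2 : pvGo ((x :: y :: rest).drop ((x :: y :: rest).length / 2))
        = (pvCat (((x :: y :: rest).drop ((x :: y :: rest).length / 2)).map pvNodeStr),
           pvCat (((x :: y :: rest).drop ((x :: y :: rest).length / 2)).map pvEdgeStr)) := ih2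
    show ((pvGo ((x :: y :: rest).take ((x :: y :: rest).length / 2))).1 ++
            (pvGo ((x :: y :: rest).drop ((x :: y :: rest).length / 2))).1,
          (pvGo ((x :: y :: rest).take ((x :: y :: rest).length / 2))).2 ++
            (pvGo ((x :: y :: rest).drop ((x :: y :: rest).length / 2))).2) = _
    rw [h1, h2]
    show (pvCat _ ++ pvCat _, pvCat _ ++ pvCat _) = _
    rw [← pvCat_append, ← pvCat_append, ← List.map_append, ← List.map_append,
      List.take_append_drop]

-- A's unconditional node pass appends the concatenation of the node lines.
theorem pvFoldNodes (xs : List (String × List String)) (s : String) :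
    xs.foldl (fun acc tc =>
      acc ++ ("  \"" ++ PySem.Str.replace (PySem.Str.replace tc.1 " " "_") "-" "_" ++
        "\" [label=\"" ++ tc.1 ++ "\\n" ++ PySem.Str.join "\\n" tc.2 ++ "\"];\n")) s
      = s ++ pvCat (xs.map pvNodeStr) := by
  induction xs generalizing s with
  | nil => simp [pvCat]
  | cons x xs ih =>
    rw [List.foldl_cons, ih]
    simp [pvCat, pvNodeStr, String.append_assoc]

-- A's conditional edge pass appends the concatenation of the (possibly empty) edge strings.
theorem pvFoldEdges (xs : List (String × List String)) (s : String) :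
    xs.foldl (fun acc tc =>
      if "id" ∈ tc.2 then acc ++ ("  \"" ++ tc.1 ++ "\" -> \"another_table\" [label=\"id\"];\n")
      else acc) s
      = s ++ pvCat (xs.map pvEdgeStr) := by
  induction xs generalizing s with
  | nil => simp [pvCat]
  | cons x xs ih =>
    rw [List.foldl_cons]
    by_cases h : "id" ∈ x.2 <;> simp only [h, if_true, if_false] <;> rw [ih] <;>
      simp [pvCat, pvEdgeStr, h, String.append_assoc]

-- ===== VERDICT (by name: the statement is the Claim_ definition above) =====
theorem convert_schema_to_dot_spec : Claim_equal_convert_schema_to_dot := by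
  intro schema_info _
  show _ = _
  simp only [convert_schema_to_dot, convert_schema_to_dot_alt]
  rw [pvFoldNodes, pvFoldEdges, pvGo_eq]
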